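-- pv_equiv track=rewrite | github.com/benquick123/code-profiling | code/izpiti/izpit01b/M-17113-1520.py | nic_ena
-- ===== SOURCE A (Python) =====
-- def nic_ena(xs):
--     a = xs.count(0)
--     b = xs.count(1)
--     list = []
--     for n in range(a):
--         list.append(0)
--     for n in range(b):
--         list.append(1)
--     return sum(i != j for i, j in zip(xs, list))
-- ===== SOURCE B (Python) =====
-- def nic_ena(xs):
--     a = xs.count(0)
--     b = xs.count(1)
--     return (a - xs[:a].count(0)) + (b - xs[a:a + b].count(1))
-- ===== Notes on version B (the rewrite author's own statement) =====
-- stated objective: simpler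
-- what changed: B never builds the sorted target list and has no comparison loop: it notes positions [0,a) should hold 0 and [a,a+b) should hold 1 (a, b = counts of 0 and 1) and returns the misplaced-element counts via two slice .count calls.
import Mathlib
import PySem

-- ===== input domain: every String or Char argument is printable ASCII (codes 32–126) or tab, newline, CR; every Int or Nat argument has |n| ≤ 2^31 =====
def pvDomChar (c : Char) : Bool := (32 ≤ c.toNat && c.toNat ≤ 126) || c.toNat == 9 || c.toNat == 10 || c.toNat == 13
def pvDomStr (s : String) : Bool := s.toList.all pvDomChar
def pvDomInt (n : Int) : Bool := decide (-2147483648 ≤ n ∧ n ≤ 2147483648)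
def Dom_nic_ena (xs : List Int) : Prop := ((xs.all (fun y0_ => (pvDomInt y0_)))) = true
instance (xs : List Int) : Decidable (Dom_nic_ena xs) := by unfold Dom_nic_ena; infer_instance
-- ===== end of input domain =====

-- B avoids building the 0/1-sorted target list and the element-comparison loop; same return value, no side effects.

-- ===== PORT A =====
def nic_ena (xs : List Int) : Int :=
  let a : Int := (xs.count 0 : Int)
  let b : Int := (xs.count 1 : Int)
  let l1 : List Int := (PySem.List.pyRange 0 a 1).foldl (fun acc _ => acc ++ [(0:Int)]) []
  let l2 : List Int := (PySem.List.pyRange 0 b 1).foldl (fun acc _ => acc ++ [(1:Int)]) l1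
  ((xs.zip l2).map (fun p => if p.1 ≠ p.2 then (1:Int) else 0)).sum

-- ===== PORT B =====
def nic_ena_alt (xs : List Int) : Int :=
  let a : Int := (xs.count 0 : Int)
  let b : Int := (xs.count 1 : Int)
  (a - ((PySem.List.slice xs none (some a)).count 0 : Int))
    + (b - ((PySem.List.slice xs (some a) (some (a + b))).count 1 : Int))

-- ===== PRECONDITION & SPEC =====
def Spec_nic_ena (xs : List Int) (out : Int) : Prop := out = nic_ena_alt xs
instance (xs : List Int) (out : Int) : Decidable (Spec_nic_ena xs out) := by unfold Spec_nic_ena; infer_instance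

-- ===== CLAIM (what is proved, stated in full; the proofs are below) =====
def Claim_equal_nic_ena : Prop := ∀ (xs : List Int), Dom_nic_ena xs → Spec_nic_ena xs (nic_ena xs)

-- ===== LEMMAS AND PROOFS =====

-- the append-in-a-range loop builds a replicate
theorem pv_foldl_append_const (l : List Int) (init : List Int) (c : Int) :
    l.foldl (fun acc _ => acc ++ [c]) init = init ++ List.replicate l.length c := by
  induction l generalizing init with
  | nil => simp
  | cons x t ih =>
    simp only [List.foldl, ih, List.length_cons, List.replicate_succ']
    rw [List.append_assoc]
    congr 1
    rw [List.singleton_append, ← List.replicate_succ, List.replicate_succ']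

-- mismatch sum of zip with a constant list counts the ≠-c elements of the truncated prefix
theorem pv_zip_replicate_sum (l : List Int) (m : Nat) (c : Int) :
    ((l.zip (List.replicate m c)).map (fun p => if p.1 ≠ p.2 then (1:Int) else 0)).sum
      = ((l.take m).countP (fun x => x ≠ c) : Int) := by
  induction l generalizing m with
  | nil => simp
  | cons x t ih =>
    cases m with
    | zero => simp
    | succ m =>
      rw [List.replicate_succ]
      simp only [List.zip_cons_cons, List.map_cons, List.sum_cons, List.take_succ_cons,
        List.countP_cons, ih]
      by_cases h : x = c <;> simp [h] <;> omega

theorem pv_count_zero_one_le (xs : List Int) : xs.count 0 + xs.count 1 ≤ xs.length := by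
  induction xs with
  | nil => simp
  | cons x t ih =>
    simp [List.count_cons]
    by_cases h0 : x = 0 <;> by_cases h1 : x = 1 <;> simp [h0, h1] at * <;> omega

theorem pv_countP_ne (l : List Int) (c : Int) :
    l.countP (fun x => x ≠ c) = l.length - l.count c := by
  have h := List.length_eq_countP_add_countP (p := fun x => x == c) (l := l)
  have : l.countP (fun x => x ≠ c) = l.countP (fun x => ¬ (x == c) = true) := by
    apply List.countP_congr; intro x _; simp
  rw [this]
  have hc : l.count c = l.countP (fun x => x == c) := by simp [List.count]
  omega

-- ===== VERDICT (by name: the statement is the Claim_ definition above) =====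
theorem nic_ena_spec : Claim_equal_nic_ena := by
  intro xs _
  unfold Spec_nic_ena nic_ena nic_ena_alt
  set A := xs.count 0 with hA
  set B := xs.count 1 with hB
  have hAle : A ≤ xs.length := List.count_le_length
  have hABle : A + B ≤ xs.length := pv_count_zero_one_le xs
  simp only
  rw [pv_foldl_append_const, pv_foldl_append_const]
  simp only [List.nil_append, PySem.List.length_pyRange_one]
  have hrange : ∀ (n : Nat), (((n : Int)) - 0).toNat = n := by intro n; simp
  rw [hrange A, hrange B]
  -- split the zip
  have hsplit : xs = xs.take A ++ xs.drop A := (List.take_append_drop _ _).symm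
  have hlen : (xs.take A).length = (List.replicate A (0:Int)).length := by
    simp [List.length_take, Nat.min_eq_left hAle]
  rw [show xs.zip (List.replicate A (0:Int) ++ List.replicate B 1)
        = (xs.take A ++ xs.drop A).zip (List.replicate A (0:Int) ++ List.replicate B 1) by
        rw [← hsplit],
      List.zip_append hlen]
  rw [List.map_append, List.sum_append, pv_zip_replicate_sum, pv_zip_replicate_sum]
  -- slices on the B side
  have hBslice : PySem.List.slice xs none (some (A : Int)) = xs.take A :=
    PySem.List.slice_to_natCast xs A
  have hBslice2 : PySem.List.slice xs (some (A : Int)) (some ((A : Int) + (B : Int)))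
      = (xs.drop A).take B := PySem.List.slice_natCast_add xs A B
  rw [hBslice, hBslice2]
  -- arithmetic: countP(≠c) = length - count c on each piece
  have h1 := pv_countP_ne ((xs.take A).take A) 0
  have h2 := pv_countP_ne ((xs.drop A).take B) 1
  have ht : (xs.take A).take A = xs.take A := by simp
  rw [ht] at h1
  have hlen1 : (xs.take A).length = A := by simp [Nat.min_eq_left hAle]
  have hlen2 : ((xs.drop A).take B).length = B := by
    simp [List.length_take, List.length_drop]; omega
  -- count on the full list restricted to the prefix/segment
  have hc1 : (xs.take A).count (0:Int) ≤ A := by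
    calc (xs.take A).count (0:Int) ≤ (xs.take A).length := List.count_le_length
    _ = A := hlen1
  have hc2 : ((xs.drop A).take B).count (1:Int) ≤ B := by
    calc ((xs.drop A).take B).count (1:Int) ≤ ((xs.drop A).take B).length := List.count_le_length
    _ = B := hlen2
  rw [ht, h1, h2, hlen1, hlen2]
  push_cast [Nat.cast_sub hc1, Nat.cast_sub hc2]
  omega
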